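-- pv_equiv track=rewrite | github.com/Martucoweb/desenvolve-python-basico | modulo6/aula3_questao3.py | encontrar_intervalo_negativos
-- ===== SOURCE A (Python) =====
-- def encontrar_intervalo_negativos(lista):
--     max_negativos = 0
--     intervalo_inicio = 0
--     intervalo_fim = 0
--
--     for i in range(len(lista)):
--         for j in range(i, len(lista)):
--             sublista = lista[i:j+1]
--             negativos = len([num for num in sublista if num < 0])
--             if negativos > max_negativos:
--                 max_negativos = negativos
--                 intervalo_inicio = i
--                 intervalo_fim = j
--
--     return intervalo_inicio, intervalo_fim
-- ===== SOURCE B (Python) =====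
-- def encontrar_intervalo_negativos(lista):
--     # The whole-prefix interval [0, last negative index] always contains every
--     # negative number, so it attains the maximum count; A's scan order makes it
--     # the stored answer. One pass: track the index of the last negative.
--     fim = 0
--     for idx, num in enumerate(lista):
--         if num < 0:
--             fim = idx
--     return 0, fim
-- ===== Notes on version B (the rewrite author's own statement) =====
-- stated objective: faster
-- what changed: Replaced the O(n^3) scan over all subintervals (with a fresh count per subinterval) by a single pass that records the index of the last negative element, since A's answer is always (0, last negative index) or (0, 0) when no negatives exist.
import Mathlib
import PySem

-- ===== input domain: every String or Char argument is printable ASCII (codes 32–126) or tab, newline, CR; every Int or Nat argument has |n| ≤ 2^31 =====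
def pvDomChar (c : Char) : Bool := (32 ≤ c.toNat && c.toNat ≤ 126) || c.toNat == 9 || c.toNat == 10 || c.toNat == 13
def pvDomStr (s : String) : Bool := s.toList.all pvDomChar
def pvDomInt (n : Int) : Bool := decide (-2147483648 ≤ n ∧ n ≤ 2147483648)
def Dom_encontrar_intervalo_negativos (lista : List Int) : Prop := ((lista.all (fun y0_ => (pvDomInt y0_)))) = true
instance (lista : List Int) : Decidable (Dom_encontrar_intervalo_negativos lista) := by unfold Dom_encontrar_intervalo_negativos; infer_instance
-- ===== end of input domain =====

-- B replaces A's O(n^3) scan over all subintervals by a single pass recording the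
-- index of the last negative element (A's stored answer is always (0, that index),
-- or (0,0) with no negatives); measured asymptotically faster.

-- ===== PORT A =====
-- helper naming the comprehension 'len([num for num in sublista if num < 0])'
def pvNegCount (sublista : List Int) : Int :=
  ((sublista.filter (fun num => num < 0)).length : Int)

-- body of the inner 'for j' loop
def pvInnerStep (lista : List Int) (i : Int) (s : Int × Int × Int) (j : Int) : Int × Int × Int :=
  let sublista := PySem.List.slice lista (some i) (some (j + 1))
  let negativos := pvNegCount sublista
  if negativos > s.1 then (negativos, i, j) else s

-- the inner 'for j in range(i, len(lista))' loop
def pvInner (lista : List Int) (s : Int × Int × Int) (i : Int) : Int × Int × Int :=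
  (PySem.List.pyRange i (lista.length : Int) 1).foldl (pvInnerStep lista i) s

def encontrar_intervalo_negativos (lista : List Int) : List Int :=
  let st := (PySem.List.pyRange 0 (lista.length : Int) 1).foldl (pvInner lista) (0, 0, 0)
  [st.2.1, st.2.2]

-- ===== PORT B =====
-- body of B's single 'for idx, num in enumerate(lista)' loop
def pvLastStep (fim : Int) (p : Int × Int) : Int := if p.2 < 0 then p.1 else fim

def encontrar_intervalo_negativos_alt (lista : List Int) : List Int :=
  let fim := (PySem.List.enumerate lista 0).foldl pvLastStep 0
  [0, fim]

-- ===== PRECONDITION & SPEC =====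
def Spec_encontrar_intervalo_negativos (lista : List Int) (out : List Int) : Prop := out = encontrar_intervalo_negativos_alt lista
instance (lista : List Int) (out : List Int) : Decidable (Spec_encontrar_intervalo_negativos lista out) := by unfold Spec_encontrar_intervalo_negativos; infer_instance

-- ===== CLAIM (what is proved, stated in full; the proofs are below) =====
def Claim_equal_encontrar_intervalo_negativos : Prop := ∀ (lista : List Int), Dom_encontrar_intervalo_negativos lista → Spec_encontrar_intervalo_negativos lista (encontrar_intervalo_negativos lista)

-- ===== LEMMAS AND PROOFS =====

-- any slice with nonnegative bounds is a sublist
theorem pv_slice_sublist (lista : List Int) (a b : Int) (ha : 0 ≤ a) (hb : 0 ≤ b) :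
    (PySem.List.slice lista (some a) (some b)).Sublist lista := by
  rw [PySem.List.slice_toNat lista ha hb]
  exact (List.take_sublist _ _).trans (List.drop_sublist _ _)

theorem pv_negCount_mono {l l' : List Int} (h : l.Sublist l') : pvNegCount l ≤ pvNegCount l' := by
  unfold pvNegCount
  exact_mod_cast (h.filter _).length_le

-- if the stored maximum already bounds the whole list's negative count, the inner loop is a no-op
theorem pv_inner_noop (lista : List Int) (i : Int) (hi : 0 ≤ i)
    (js : List Int) (hjs : ∀ j ∈ js, 0 ≤ j) (s : Int × Int × Int)
    (hmax : pvNegCount lista ≤ s.1) :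
    js.foldl (pvInnerStep lista i) s = s := by
  induction js with
  | nil => rfl
  | cons j js ih =>
    have hj : 0 ≤ j := hjs j (by simp)
    have hle : pvNegCount (PySem.List.slice lista (some i) (some (j + 1))) ≤ s.1 :=
      le_trans (pv_negCount_mono (pv_slice_sublist lista i (j+1) hi (by omega))) hmax
    have hstep : pvInnerStep lista i s j = s := by
      unfold pvInnerStep
      simp only []
      rw [if_neg (by omega)]
    rw [List.foldl_cons, hstep]
    exact ih (fun j hj => hjs j (List.mem_cons_of_mem _ hj))

theorem pv_enumerate_append (l : List Int) (x : Int) (s : Int) :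
    PySem.List.enumerate (l ++ [x]) s = PySem.List.enumerate l s ++ [((s + l.length : Int), x)] := by
  induction l generalizing s with
  | nil => simp [PySem.List.enumerate_nil, PySem.List.enumerate_cons]
  | cons y l ih =>
    simp only [List.cons_append, PySem.List.enumerate_cons, ih, List.length_cons]
    have h1 : s + 1 + (l.length : Int) = s + ((l.length : Int) + 1) := by omega
    rw [h1]
    push_cast
    ring_nf

-- the i = 0 inner loop over range(0, m) computes the prefix negative count and B's fim over the prefix
theorem pv_inner_zero (lista : List Int) (m : Nat) :
    (PySem.List.pyRange 0 (m : Int) 1).foldl (pvInnerStep lista 0) (0, 0, 0) =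
      (pvNegCount (lista.take m), 0, (PySem.List.enumerate (lista.take m) 0).foldl pvLastStep 0) := by
  induction m with
  | zero => simp [PySem.List.pyRange_one_eq_nil, pvNegCount]
  | succ m ih =>
    have hsplit : PySem.List.pyRange 0 ((m + 1 : Nat) : Int) 1
        = PySem.List.pyRange 0 (m : Int) 1 ++ [(m : Int)] := by
      push_cast
      exact PySem.List.pyRange_one_succ_right (by positivity)
    rw [hsplit, List.foldl_append, ih, List.foldl_cons, List.foldl_nil]
    by_cases hm : m < lista.length
    · -- one more real element lista[m]
      have htake : lista.take (m + 1) = lista.take m ++ [lista[m]] := by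
        rw [List.take_add_one, List.getElem?_eq_getElem hm]; rfl
      have hslice : PySem.List.slice lista (some 0) (some ((m : Int) + 1)) = lista.take (m + 1) := by
        rw [PySem.List.slice_zero_start]
        exact_mod_cast PySem.List.slice_to_natCast lista (m + 1)
      have hlen : (lista.take m).length = m := by simp [List.length_take]; omega
      have hnc : pvNegCount (lista.take (m + 1))
          = pvNegCount (lista.take m) + (if lista[m] < 0 then 1 else 0) := by
        rw [htake]; unfold pvNegCount
        rw [List.filter_append]
        by_cases hx : lista[m] < 0 <;> simp [hx]
      have hfim : (PySem.List.enumerate (lista.take (m + 1)) 0).foldl pvLastStep 0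
          = if lista[m] < 0 then (m : Int)
            else (PySem.List.enumerate (lista.take m) 0).foldl pvLastStep 0 := by
        rw [htake, pv_enumerate_append, List.foldl_append, List.foldl_cons, List.foldl_nil]
        unfold pvLastStep
        by_cases hx : lista[m] < 0 <;> simp [hx, hlen]
      unfold pvInnerStep
      simp only [hslice, hnc]
      by_cases hx : lista[m] < 0
      · rw [if_pos (by simp [hx])]
        simp [hfim, hx]
      · rw [if_neg (by simp [hx])]
        simp [hfim, hx]
    · -- j = m is past the end: the slice is the whole prefix again, no update
      have htake : lista.take (m + 1) = lista.take m := by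
        rw [List.take_of_length_le (by omega), List.take_of_length_le (by omega)]
      have hslice : PySem.List.slice lista (some 0) (some ((m : Int) + 1)) = lista.take (m + 1) := by
        rw [PySem.List.slice_zero_start]
        exact_mod_cast PySem.List.slice_to_natCast lista (m + 1)
      unfold pvInnerStep
      simp only [hslice, htake]
      rw [if_neg (by omega)]

-- the outer loop never updates once the stored maximum is the whole list's count
theorem pv_outer_noop (lista : List Int) (is : List Int) (his : ∀ i ∈ is, 0 ≤ i)
    (s : Int × Int × Int) (hmax : pvNegCount lista ≤ s.1) :
    is.foldl (pvInner lista) s = s := by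
  induction is with
  | nil => rfl
  | cons i is ih =>
    have hi : 0 ≤ i := his i (by simp)
    have hstep : pvInner lista s i = s := by
      unfold pvInner
      exact pv_inner_noop lista i hi _
        (fun j hj => le_trans hi (PySem.List.mem_pyRange_one.mp hj).1) s hmax
    rw [List.foldl_cons, hstep]
    exact ih (fun i hi => his i (List.mem_cons_of_mem _ hi))

-- ===== VERDICT (by name: the statement is the Claim_ definition above) =====
theorem encontrar_intervalo_negativos_spec : Claim_equal_encontrar_intervalo_negativos := by
  intro lista _
  show encontrar_intervalo_negativos lista = encontrar_intervalo_negativos_alt lista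
  unfold encontrar_intervalo_negativos encontrar_intervalo_negativos_alt
  rcases Nat.eq_zero_or_pos lista.length with h0 | hpos
  · rw [List.length_eq_zero_iff] at h0
    subst h0
    rfl
  · have hcons : PySem.List.pyRange 0 (lista.length : Int) 1
        = 0 :: PySem.List.pyRange 1 (lista.length : Int) 1 := by
      have := PySem.List.pyRange_one_cons (a := 0) (b := (lista.length : Int)) (by exact_mod_cast hpos)
      simpa using this
    rw [hcons, List.foldl_cons]
    have hfirst : pvInner lista (0, 0, 0) 0
        = (pvNegCount lista, 0, (PySem.List.enumerate lista 0).foldl pvLastStep 0) := by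
      unfold pvInner
      have := pv_inner_zero lista lista.length
      simpa [List.take_length] using this
    rw [hfirst, pv_outer_noop lista _
      (fun i hi => le_trans (by norm_num) (PySem.List.mem_pyRange_one.mp hi).1) _ le_rfl]
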